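-- pv_equiv track=rewrite | github.com/PChild/frc-data-scripts | draft_sizing.py | get_tier_sizes
-- ===== SOURCE A (Python) =====
-- import math
--
-- def get_tier_sizes(num_players, num_teams, num_picks=3):
--     tiers = math.ceil(num_players / math.floor(num_teams / num_picks))
--     current_size = math.floor(num_players / tiers)
--
--     tier_sizes = []
--
--     while num_players > current_size:
--         tier_sizes.append(current_size)
--         num_players -= current_size
--         tiers -= 1
--         current_size = math.floor(num_players / tiers)
--
--     tier_sizes.append(num_players)
--
--     return tier_sizes
-- ===== SOURCE B (Python) =====
-- import math
--
-- def get_tier_sizes(num_players, num_teams, num_picks=3):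
--     tiers = math.ceil(num_players / math.floor(num_teams / num_picks))
--     base, rem = divmod(num_players, tiers)
--     return [base] * (tiers - rem) + [base + 1] * rem
-- ===== Notes on version B (the rewrite author's own statement) =====
-- stated objective: simpler
-- what changed: Replaces A's while-loop that peels one tier at a time, re-dividing at every step, with the closed-form balanced partition [base]*(tiers-rem)+[base+1]*rem from a single divmod; Pre_ restricts to the natural domain of positive player counts and a positive floor(num_teams/num_picks) (on non-positive counts A's single-element answer is an artefact of its loop condition, and a negative divisor makes A loop forever or raise).
-- outside the precondition, e.g. on get_tier_sizes(-7, 9, 3): A returns [-7], B returns []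
import Mathlib
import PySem

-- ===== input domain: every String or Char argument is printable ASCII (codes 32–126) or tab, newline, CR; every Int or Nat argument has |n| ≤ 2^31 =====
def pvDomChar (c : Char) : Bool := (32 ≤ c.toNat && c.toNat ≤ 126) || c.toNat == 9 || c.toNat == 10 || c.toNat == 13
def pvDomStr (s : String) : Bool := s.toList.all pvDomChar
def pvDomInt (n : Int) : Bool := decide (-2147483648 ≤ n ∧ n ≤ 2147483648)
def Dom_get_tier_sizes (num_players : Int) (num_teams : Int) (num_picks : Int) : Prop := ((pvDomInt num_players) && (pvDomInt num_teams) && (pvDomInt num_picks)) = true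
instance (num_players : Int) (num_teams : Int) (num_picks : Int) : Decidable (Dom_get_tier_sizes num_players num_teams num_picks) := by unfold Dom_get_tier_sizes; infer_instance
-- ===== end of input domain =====

-- B replaces A's tier-peeling while-loop by the closed-form balanced partition from a single
-- divmod (simpler: no loop); equivalence is proved on the natural domain stated in Pre_ below.

-- ===== PORT A =====
-- math.ceil(a / b) on ints: with |a|,|b| ≤ 2^31 the float quotient rounds by < 1/|b| of an
-- integer boundary, so the float ceil equals exact ceiling division -((-a) // b). Exact on Dom.
def pvCeilDiv (a b : Int) : Int := -(PySem.Int.floordiv (-a) b)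

-- A's while-loop; fuel = initial `tiers`.toNat bounds the iteration count (the loop decrements
-- tiers each pass and always stops by tiers = 1 when it terminates at all); when fuel runs out
-- the loop exit action (append remaining num_players) is taken, which on every input admitted
-- by Pre_ is exactly what Python does.
def pvLoopA (fuel : Nat) (p tiers cur : Int) (acc : List Int) : List Int :=
  match fuel with
  | 0 => acc ++ [p]
  | f + 1 =>
    if cur < p then
      pvLoopA f (p - cur) (tiers - 1) (PySem.Int.floordiv (p - cur) (tiers - 1)) (acc ++ [cur])
    else acc ++ [p]

def get_tier_sizes (num_players : Int) (num_teams : Int) (num_picks : Int) : List Int :=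
  let tiers := pvCeilDiv num_players (PySem.Int.floordiv num_teams num_picks)
  let current_size := PySem.Int.floordiv num_players tiers
  pvLoopA tiers.toNat num_players tiers current_size []

-- ===== PORT B =====
def get_tier_sizes_alt (num_players : Int) (num_teams : Int) (num_picks : Int) : List Int :=
  let tiers := -(PySem.Int.floordiv (-num_players) (PySem.Int.floordiv num_teams num_picks))
  let base := PySem.Int.floordiv num_players tiers
  let rem := PySem.Int.mod num_players tiers
  List.replicate (tiers - rem).toNat base ++ List.replicate rem.toNat (base + 1)

-- ===== PRECONDITION & SPEC =====
-- Pre_ restricts to the natural domain of a draft: a positive player count and a positive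
-- floor(num_teams/num_picks). It thereby excludes (a) inputs where the Python A does not
-- return (ZeroDivisionError when num_picks = 0, floor(num_teams/num_picks) = 0 or tiers = 0;
-- an infinite loop when num_players > 0 with a negative divisor), and (b) non-positive player
-- counts, on which A's single-element answer [num_players] is an artefact of its loop
-- condition and B naturally returns an empty/partitioned list instead.
def Pre_get_tier_sizes (num_players : Int) (num_teams : Int) (num_picks : Int) : Prop :=
  num_picks ≠ 0 ∧ 0 < PySem.Int.floordiv num_teams num_picks ∧ 0 < num_players
instance (num_players : Int) (num_teams : Int) (num_picks : Int) : Decidable (Pre_get_tier_sizes num_players num_teams num_picks) := by unfold Pre_get_tier_sizes; infer_instance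

def pvWitness_get_tier_sizes : Int × Int × Int := (7, 9, 3)

def Spec_get_tier_sizes (num_players : Int) (num_teams : Int) (num_picks : Int) (out : List Int) : Prop := out = get_tier_sizes_alt num_players num_teams num_picks
instance (num_players : Int) (num_teams : Int) (num_picks : Int) (out : List Int) : Decidable (Spec_get_tier_sizes num_players num_teams num_picks out) := by unfold Spec_get_tier_sizes; infer_instance

-- ===== CLAIM (what is proved, stated in full; the proofs are below) =====
def Claim_equal_get_tier_sizes : Prop := ∀ (num_players : Int) (num_teams : Int) (num_picks : Int), Dom_get_tier_sizes num_players num_teams num_picks → Pre_get_tier_sizes num_players num_teams num_picks → Spec_get_tier_sizes num_players num_teams num_picks (get_tier_sizes num_players num_teams num_picks)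

-- ===== LEMMAS AND PROOFS =====

-- The loop from a positive state computes the balanced partition.
lemma pvLoopA_closed : ∀ (f : Nat) (p tiers : Int) (acc : List Int),
    0 < p → 0 < tiers → tiers ≤ (f : Int) + 1 →
    pvLoopA f p tiers (PySem.Int.floordiv p tiers) acc
      = acc ++ List.replicate (tiers - PySem.Int.mod p tiers).toNat (PySem.Int.floordiv p tiers)
            ++ List.replicate (PySem.Int.mod p tiers).toNat (PySem.Int.floordiv p tiers + 1) := by
  intro f
  induction f with
  | zero =>
    intro p tiers acc hp ht hle
    have ht1 : tiers = 1 := by omega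
    subst ht1
    rw [PySem.Int.floordiv_eq_ediv_of_pos (by omega), PySem.Int.mod_eq_emod_of_pos (by omega)]
    simp [pvLoopA]
  | succ f ih =>
    intro p tiers acc hp ht hle
    rw [PySem.Int.floordiv_eq_ediv_of_pos ht, PySem.Int.mod_eq_emod_of_pos ht]
    by_cases h1 : tiers = 1
    · subst h1
      simp [pvLoopA]
    · have ht2 : 2 ≤ tiers := by omega
      have hqr : tiers * (p / tiers) + p % tiers = p := Int.mul_ediv_add_emod p tiers
      have hr0 : 0 ≤ p % tiers := Int.emod_nonneg p (by omega)
      have hrlt : p % tiers < tiers := Int.emod_lt_of_pos p ht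
      have hq0 : 0 ≤ p / tiers := Int.ediv_nonneg (le_of_lt hp) (le_of_lt ht)
      have hqp : p / tiers < p := by nlinarith
      have key : p - p / tiers = p % tiers + p / tiers * (tiers - 1) := by linear_combination -hqr
      have hp' : 0 < p - p / tiers := by nlinarith
      simp only [pvLoopA, if_pos hqp]
      rw [ih (p - p / tiers) (tiers - 1) (acc ++ [p / tiers]) hp' (by omega)
          (by push_cast at hle ⊢; omega)]
      rw [PySem.Int.floordiv_eq_ediv_of_pos (show (0:Int) < tiers - 1 by omega),
          PySem.Int.mod_eq_emod_of_pos (show (0:Int) < tiers - 1 by omega)]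
      by_cases hr : p % tiers < tiers - 1
      · have e1 : (p - p / tiers) / (tiers - 1) = p / tiers := by
          rw [key, Int.add_mul_ediv_right _ _ (show tiers - 1 ≠ 0 by omega),
              Int.ediv_eq_zero_of_lt hr0 hr, zero_add]
        have e2 : (p - p / tiers) % (tiers - 1) = p % tiers := by
          rw [key]; simp [Int.emod_eq_of_lt hr0 hr]
        rw [e1, e2]
        have e3 : (tiers - p % tiers).toNat = (tiers - 1 - p % tiers).toNat + 1 := by omega
        rw [e3, List.replicate_succ]
        simp
      · have hre : p % tiers = tiers - 1 := by omega
        have key2 : p - p / tiers = (p / tiers + 1) * (tiers - 1) := by rw [key, hre]; ring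
        have e1 : (p - p / tiers) / (tiers - 1) = p / tiers + 1 := by
          rw [key2, Int.mul_ediv_cancel _ (show tiers - 1 ≠ 0 by omega)]
        have e2 : (p - p / tiers) % (tiers - 1) = 0 := by
          rw [key2, Int.mul_emod_left]
        rw [e1, e2, hre]
        have e3 : (tiers - (tiers - 1)).toNat = 1 := by omega
        simp

-- ===== VERDICT (by name: the statement is the Claim_ definition above) =====
theorem get_tier_sizes_spec : Claim_equal_get_tier_sizes := by
  intro p t k _ hpre
  obtain ⟨hk, hd, hp⟩ := hpre
  unfold Spec_get_tier_sizes get_tier_sizes get_tier_sizes_alt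
  simp only []
  set d := PySem.Int.floordiv t k with hdd
  set tiers := pvCeilDiv p d with htt
  have htalt : -(PySem.Int.floordiv (-p) d) = tiers := rfl
  have htp : 0 < tiers := by
    rw [htt, pvCeilDiv, PySem.Int.floordiv_eq_ediv_of_pos hd]
    have h1 : (-p) / d < 0 := by
      by_contra h
      push Not at h
      have hqr := Int.mul_ediv_add_emod (-p) d
      have hr0 : 0 ≤ (-p) % d := Int.emod_nonneg _ (by omega)
      nlinarith
    omega
  rw [pvLoopA_closed tiers.toNat p tiers [] hp htp (by omega), htalt]
  simp
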